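-- pv_equiv track=rewrite | github.com/mariojuegosydemas-dev/informatica | fecha.py | devuelve_mes
-- ===== SOURCE A (Python) =====
-- def devuelve_mes(fecha):
--     mes=""
--     cont=0
--     nespacios=0
--     longitud=len(fecha)
--     while(cont<longitud):
--         if(fecha[cont]==" "):
--             nespacios=nespacios+1
--         else:
--             if(nespacios==2):
--                 mes=mes+fecha[cont]
--         cont=cont+1
--     return(mes)
-- ===== SOURCE B (Python) =====
-- def devuelve_mes(fecha):
--     partes = fecha.split(" ")
--     return partes[2] if len(partes) > 2 else ""
-- ===== Notes on version B (the rewrite author's own statement) =====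
-- stated objective: idiomatic
-- what changed: Replaces the manual space-counting character-by-character scan with tokenizing the string on the single-space separator via str.split and indexing field 2, with a length guard returning the empty string.
import Mathlib
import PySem

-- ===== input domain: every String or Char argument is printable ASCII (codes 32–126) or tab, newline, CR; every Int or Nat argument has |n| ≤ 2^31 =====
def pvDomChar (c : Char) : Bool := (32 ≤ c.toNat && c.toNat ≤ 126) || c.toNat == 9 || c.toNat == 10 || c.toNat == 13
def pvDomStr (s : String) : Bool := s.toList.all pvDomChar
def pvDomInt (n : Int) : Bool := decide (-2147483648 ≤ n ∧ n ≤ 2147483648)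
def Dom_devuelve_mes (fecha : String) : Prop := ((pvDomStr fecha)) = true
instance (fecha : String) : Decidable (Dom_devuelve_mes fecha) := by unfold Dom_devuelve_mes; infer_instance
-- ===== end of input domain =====

-- B replaces A's manual space-counting character scan with split(" ") and indexing field 2 (idiomatic, same cost).

-- ===== PORT A =====
-- the while-loop over fecha's characters with state (mes, nespacios)
def devuelveMesLoop : List Char → List Char → Nat → List Char
  | [], mes, _ => mes
  | c :: rest, mes, nesp =>
    if c = ' ' then devuelveMesLoop rest mes (nesp + 1)
    else if nesp = 2 then devuelveMesLoop rest (mes ++ [c]) nesp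
    else devuelveMesLoop rest mes nesp

def devuelve_mes (fecha : String) : String :=
  String.ofList (devuelveMesLoop fecha.toList [] 0)

-- ===== PORT B =====
def devuelve_mes_alt (fecha : String) : String :=
  -- fecha.split(" "): separator " " is nonempty, so Python's split never raises
  let partes := (PySem.Chars.splitOn fecha.toList [' ']).map String.ofList
  if 2 < partes.length then partes.getD 2 "" else ""

-- ===== PRECONDITION & SPEC =====
def Spec_devuelve_mes (fecha : String) (out : String) : Prop := out = devuelve_mes_alt fecha
instance (fecha : String) (out : String) : Decidable (Spec_devuelve_mes fecha out) := by unfold Spec_devuelve_mes; infer_instance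

-- ===== CLAIM (what is proved, stated in full; the proofs are below) =====
def Claim_equal_devuelve_mes : Prop := ∀ (fecha : String), Dom_devuelve_mes fecha → Spec_devuelve_mes fecha (devuelve_mes fecha)

-- ===== LEMMAS AND PROOFS =====

-- reference split on a single space, with the pending (reversed) current field
def sspl : List Char → List Char → List (List Char)
  | [], cur => [cur.reverse]
  | c :: rest, cur =>
    if c = ' ' then cur.reverse :: sspl rest [] else sspl rest (c :: cur)

theorem splitOn_go_eq (fuel : Nat) (l cur acc : List Char) (acc2 : List (List Char))
    (h : l.length < fuel) :
    PySem.Chars.splitOn.go [' '] fuel l cur acc2 = acc2.reverse ++ sspl l cur := by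
  induction fuel generalizing l cur acc2 with
  | zero => omega
  | succ n ih =>
    cases l with
    | nil => simp [PySem.Chars.splitOn.go, sspl]
    | cons c rest =>
      by_cases hc : c = ' '
      · subst hc
        simp only [PySem.Chars.splitOn.go, sspl]
        rw [show ([' '].isPrefixOf (' ' :: rest)) = true by simp [List.isPrefixOf]]
        simp only [if_true, List.length, List.drop]
        rw [ih rest [] (cur.reverse :: acc2) (by simp at h ⊢; omega)]
        simp
      · simp only [PySem.Chars.splitOn.go, sspl]
        rw [show ([' '].isPrefixOf (c :: rest)) = false by
          simp [List.isPrefixOf]; exact fun h' => hc h'.symm]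
        simp only [Bool.false_eq_true, if_false, if_neg hc]
        exact ih rest (c :: cur) acc2 (by simp at h ⊢; omega)

theorem splitOn_eq_sspl (l : List Char) :
    PySem.Chars.splitOn l [' '] = sspl l [] := by
  have := splitOn_go_eq (l.length + 1) l [] [] [] (by omega)
  simpa [PySem.Chars.splitOn] using this

-- what A's loop collects after the second space, pure version
def pick : List Char → Nat → List Char
  | [], _ => []
  | c :: rest, k =>
    if c = ' ' then pick rest (k + 1)
    else if k = 2 then c :: pick rest k
    else pick rest k

theorem loop_eq_pick (l : List Char) (m : List Char) (k : Nat) :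
    devuelveMesLoop l m k = m ++ pick l k := by
  induction l generalizing m k with
  | nil => simp [devuelveMesLoop, pick]
  | cons c rest ih =>
    simp only [devuelveMesLoop, pick]
    split_ifs with h1 h2
    · exact ih m (k + 1)
    · rw [ih (m ++ [c]) k]; simp
    · exact ih m k

theorem pick_gt (l : List Char) (k : Nat) (h : 2 < k) : pick l k = [] := by
  induction l generalizing k with
  | nil => rfl
  | cons c rest ih =>
    simp only [pick]
    split_ifs with h1 h2
    · exact ih (k + 1) (by omega)
    · omega
    · exact ih k h

theorem pick_eq_sspl_getD (l cur : List Char) (k : Nat) (hk : k ≤ 2) :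
    (if k = 2 then cur.reverse ++ pick l 2 else pick l k) = (sspl l cur).getD (2 - k) [] := by
  induction l generalizing cur k with
  | nil =>
    by_cases hk2 : k = 2
    · subst hk2; simp [sspl, pick]
    · rw [if_neg hk2]
      simp only [sspl, pick]
      rw [List.getD_eq_getElem?_getD, List.getElem?_eq_none (by simp; omega)]
      rfl
  | cons c rest ih =>
    by_cases hc : c = ' '
    · subst hc
      by_cases hk2 : k = 2
      · subst hk2
        simp [sspl, pick, pick_gt rest 3 (by omega)]
      · rw [if_neg hk2]
        simp only [sspl, pick, if_true]
        have h2k : 2 - k = (2 - (k + 1)) + 1 := by omega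
        rw [h2k, List.getD_cons_succ, ← ih ([] : List Char) (k + 1) (by omega)]
        by_cases hk12 : k + 1 = 2
        · rw [if_pos hk12, hk12]; rfl
        · rw [if_neg hk12]
    · have hchar : (c = ' ') = False := by simp [hc]
      by_cases hk2 : k = 2
      · subst hk2
        have h := ih (c :: cur) 2 (by omega)
        rw [if_pos rfl] at h ⊢
        simp only [sspl, hchar, if_false, pick]
        rw [← h]
        simp
      · have h := ih (c :: cur) k hk
        rw [if_neg hk2] at h ⊢
        simp only [sspl, hchar, if_false, pick, if_neg hk2]
        exact h

theorem pick_zero (l : List Char) : pick l 0 = (sspl l []).getD 2 [] := by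
  have := pick_eq_sspl_getD l [] 0 (by omega)
  simpa using this

-- ===== VERDICT (by name: the statement is the Claim_ definition above) =====
theorem devuelve_mes_spec : Claim_equal_devuelve_mes := by
  intro fecha _
  unfold Spec_devuelve_mes devuelve_mes devuelve_mes_alt
  rw [loop_eq_pick, pick_zero, splitOn_eq_sspl]
  simp only [List.nil_append]
  set X := sspl fecha.toList [] with hX
  by_cases h : 2 < X.length
  · rw [if_pos (by simpa using h)]
    have h2 : (X.map String.ofList).getD 2 "" = String.ofList (X.getD 2 []) := by
      rw [List.getD_eq_getElem?_getD, List.getD_eq_getElem?_getD, List.getElem?_map]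
      rw [List.getElem?_eq_getElem h]
      simp
    rw [h2]
  · rw [if_neg (by simpa using h)]
    rw [List.getD_eq_getElem?_getD, List.getElem?_eq_none (by omega)]
    rfl
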